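-- pv_equiv track=rewrite | github.com/spirali/nedoc | nedoc/utils.py | join_upto_limit
-- ===== SOURCE A (Python) =====
-- def join_upto_limit(args, delimiter, limit):
--     result = delimiter.join(args)
--     if len(result) <= limit:
--         return False, result
--     limit -= 4
--     while args:
--         args.pop()
--         result = delimiter.join(args)
--         if len(result) <= limit:
--             return True, result + delimiter + "..."
--     return True, "..."
-- ===== SOURCE B (Python) =====
-- def join_upto_limit(args, delimiter, limit):
--     dl = len(delimiter)
--     cost = sum(len(a) for a in args) + max(len(args) - 1, 0) * dl
--     if cost <= limit:
--         return False, delimiter.join(args)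
--     lim = limit - 4
--     k = len(args)
--     while k > 0:
--         k -= 1
--         cost -= len(args[k]) + (dl if k > 0 else 0)
--         if cost <= lim:
--             return True, delimiter.join(args[:k]) + delimiter + "..."
--     return True, "..."
-- ===== Notes on version B (the rewrite author's own statement) =====
-- stated objective: faster
-- what changed: A repeatedly pops the last element and re-joins the whole remaining list each iteration; B sums the element lengths once, keeps a running cost that it decrements per step to find the largest fitting prefix, and joins exactly once at the end.
import Mathlib
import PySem

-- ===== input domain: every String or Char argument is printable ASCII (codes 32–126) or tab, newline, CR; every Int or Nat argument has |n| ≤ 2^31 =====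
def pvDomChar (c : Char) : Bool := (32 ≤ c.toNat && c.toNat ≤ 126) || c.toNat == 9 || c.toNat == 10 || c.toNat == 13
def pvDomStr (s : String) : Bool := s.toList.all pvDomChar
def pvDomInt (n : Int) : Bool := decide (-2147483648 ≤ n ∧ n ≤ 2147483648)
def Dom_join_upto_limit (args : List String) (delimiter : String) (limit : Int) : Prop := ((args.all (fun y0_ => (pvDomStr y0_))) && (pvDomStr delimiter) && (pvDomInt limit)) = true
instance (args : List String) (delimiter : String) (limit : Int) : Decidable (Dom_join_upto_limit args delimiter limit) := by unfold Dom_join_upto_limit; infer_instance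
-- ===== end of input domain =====

-- B replaces A's repeated pop-and-rejoin by one length pre-scan and a running cost that is
-- decremented per step, joining once at the end (objective: faster). Equivalence is about the
-- RETURN value only: Python A pops its `args` argument in place, B does not mutate it.

-- ===== PORT A =====
-- A's `while args: args.pop(); result = delimiter.join(args); if len(result) <= limit: ...`
-- (list.pop() removes the LAST element, so each iteration re-joins args.dropLast)
def pvALoop (delimiter : String) (limit : Int) (args : List String) : Bool × String :=
  match args with
  | [] => (true, "...")
  | x :: rest =>
    let args' := (x :: rest).dropLast
    let result := PySem.Str.join delimiter args'
    if PySem.Str.len result ≤ limit then (true, result ++ delimiter ++ "...")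
    else pvALoop delimiter limit args'
termination_by args.length
decreasing_by simp

def join_upto_limit (args : List String) (delimiter : String) (limit : Int) : Bool × String :=
  let result := PySem.Str.join delimiter args
  if PySem.Str.len result ≤ limit then (false, result)
  else pvALoop delimiter (limit - 4) args

-- ===== PORT B =====
-- B's `while k > 0: k -= 1; cost -= len(args[k]) + (dl if k > 0 else 0); ...`
-- (`args[k]` is always in range in this loop, so List.getD is exact; `args[:k]` with 0 ≤ k ≤ len is List.take)
def pvBLoop (args : List String) (delimiter : String) (lim dl : Int) : Nat → Int → Bool × String
  | 0, _ => (true, "...")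
  | k + 1, cost =>
    let cost' := cost - (PySem.Str.len (args.getD k "") + if k > 0 then dl else 0)
    if cost' ≤ lim then (true, PySem.Str.join delimiter (args.take k) ++ delimiter ++ "...")
    else pvBLoop args delimiter lim dl k cost'

def join_upto_limit_alt (args : List String) (delimiter : String) (limit : Int) : Bool × String :=
  let dl : Int := PySem.Str.len delimiter
  let cost : Int := args.foldl (fun s a => s + PySem.Str.len a) 0
      + max ((args.length : Int) - 1) 0 * dl
  if cost ≤ limit then (false, PySem.Str.join delimiter args)
  else pvBLoop args delimiter (limit - 4) dl args.length cost

-- ===== PRECONDITION & SPEC =====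
def Spec_join_upto_limit (args : List String) (delimiter : String) (limit : Int) (out : Bool × String) : Prop := out = join_upto_limit_alt args delimiter limit
instance (args : List String) (delimiter : String) (limit : Int) (out : Bool × String) : Decidable (Spec_join_upto_limit args delimiter limit out) := by unfold Spec_join_upto_limit; infer_instance

-- ===== CLAIM (what is proved, stated in full; the proofs are below) =====
def Claim_equal_join_upto_limit : Prop := ∀ (args : List String) (delimiter : String) (limit : Int), Dom_join_upto_limit args delimiter limit → Spec_join_upto_limit args delimiter limit (join_upto_limit args delimiter limit)

-- ===== LEMMAS AND PROOFS =====

theorem charsJoin_snoc (sep : List Char) (l : List (List Char)) (a : List Char) :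
    PySem.Chars.join sep (l ++ [a]) =
      if l.isEmpty then a else PySem.Chars.join sep l ++ sep ++ a := by
  induction l with
  | nil => simp [PySem.Chars.join_singleton]
  | cons x t ih =>
    cases t with
    | nil => simp [PySem.Chars.join_cons_cons, PySem.Chars.join_singleton]
    | cons y ys =>
      have h1 : ((x :: y :: ys) ++ [a]) = x :: ((y :: ys) ++ [a]) := rfl
      have h2 : ((y :: ys) ++ [a]) = y :: (ys ++ [a]) := rfl
      rw [h1, h2, PySem.Chars.join_cons_cons, ← h2, ih]
      simp [PySem.Chars.join_cons_cons, List.append_assoc]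

-- length of the join of xs, as an Int
def pvLenJ (delimiter : String) (xs : List String) : Int :=
  PySem.Str.len (PySem.Str.join delimiter xs)

theorem pvLenJ_nil (d : String) : pvLenJ d [] = 0 := by
  simp [pvLenJ, PySem.Str.len_eq, PySem.Str.toList_join, PySem.Chars.join_nil]

theorem pvLenJ_snoc (d : String) (xs : List String) (a : String) :
    pvLenJ d (xs ++ [a]) =
      pvLenJ d xs + (if xs.isEmpty then 0 else PySem.Str.len d) + PySem.Str.len a := by
  simp only [pvLenJ, PySem.Str.len_eq, PySem.Str.toList_join, List.map_append, List.map_cons,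
    List.map_nil, charsJoin_snoc]
  cases xs with
  | nil => simp [PySem.Chars.join_nil]
  | cons x t => simp [List.length_append]; ring

-- B's up-front cost formula equals the length of the full join
theorem pvCost_eq (d : String) (xs : List String) :
    xs.foldl (fun s a => s + PySem.Str.len a) 0
      + max ((xs.length : Int) - 1) 0 * PySem.Str.len d = pvLenJ d xs := by
  induction xs using List.reverseRecOn with
  | nil => simp [pvLenJ_nil]
  | append_singleton xs a ih =>
    rw [pvLenJ_snoc, ← ih, List.foldl_append]
    have hlen : (0 : Int) ≤ PySem.Str.len d := by
      simp [PySem.Str.len_eq]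
    cases xs with
    | nil => simp
    | cons x t =>
      simp only [List.foldl_cons, List.foldl_nil, List.length_append, List.length_cons,
        List.isEmpty_cons]
      push_cast
      rw [max_eq_left (by omega), max_eq_left (by omega)]
      ring_nf
      simp

theorem pvALoop_snoc (d : String) (lim : Int) (l : List String) (a : String) :
    pvALoop d lim (l ++ [a]) =
      if PySem.Str.len (PySem.Str.join d l) ≤ lim
      then (true, PySem.Str.join d l ++ d ++ "...")
      else pvALoop d lim l := by
  cases l with
  | nil =>
    rw [List.nil_append]
    simp only [pvALoop, List.dropLast_singleton]
    rfl
  | cons x t =>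
    have e : (x :: t) ++ [a] = x :: (t ++ [a]) := rfl
    rw [e, pvALoop]
    have e2 : (x :: (t ++ [a])).dropLast = x :: t := by
      rw [← e, List.dropLast_concat]
    simp only [e2]

-- the two loops agree whenever B's running cost equals the length of the join of the first k args
theorem pvLoop_eq (args : List String) (d : String) (lim : Int) :
    ∀ (k : Nat), k ≤ args.length → ∀ cost, cost = pvLenJ d (args.take k) →
    pvALoop d lim (args.take k) = pvBLoop args d lim (PySem.Str.len d) k cost := by
  intro k
  induction k with
  | zero => intro _ cost _; rw [List.take_zero, pvALoop, pvBLoop]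
  | succ k ih =>
    intro hk cost hc
    have hklt : k < args.length := by omega
    have htake : args.take (k + 1) = args.take k ++ [args.getD k ""] := by
      rw [List.take_add_one]
      congr 1
      simp [List.getElem?_eq_getElem hklt, List.getD]
    have hcost' : cost - (PySem.Str.len (args.getD k "") + if k > 0 then PySem.Str.len d else 0)
        = pvLenJ d (args.take k) := by
      rw [hc, htake, pvLenJ_snoc]
      cases k with
      | zero => simp [pvLenJ_nil]
      | succ m =>
        have hne : args ≠ [] := by intro h; subst h; simp at hklt
        have hie : (args.take (m + 1)).isEmpty = false := by
          simp [List.take_eq_nil_iff, hne]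
        rw [hie]; simp; ring
    rw [htake, pvALoop_snoc, pvBLoop]
    simp only [hcost']
    rw [show PySem.Str.len (PySem.Str.join d (List.take k args)) = pvLenJ d (List.take k args) from rfl]
    split_ifs with h
    · rfl
    · exact ih (le_of_lt hklt) _ rfl

-- ===== VERDICT (by name: the statement is the Claim_ definition above) =====
theorem join_upto_limit_spec : Claim_equal_join_upto_limit := by
  intro args d limit _
  show join_upto_limit args d limit = join_upto_limit_alt args d limit
  show (if PySem.Str.len (PySem.Str.join d args) ≤ limit then ((false : Bool), PySem.Str.join d args)
        else pvALoop d (limit - 4) args)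
     = (if (args.foldl (fun s a => s + PySem.Str.len a) 0
            + max ((args.length : Int) - 1) 0 * PySem.Str.len d) ≤ limit
        then ((false : Bool), PySem.Str.join d args)
        else pvBLoop args d (limit - 4) (PySem.Str.len d) args.length
          (args.foldl (fun s a => s + PySem.Str.len a) 0
            + max ((args.length : Int) - 1) 0 * PySem.Str.len d))
  rw [pvCost_eq, show PySem.Str.len (PySem.Str.join d args) = pvLenJ d args from rfl]
  split_ifs with h
  · rfl
  · have := pvLoop_eq args d (limit - 4) args.length le_rfl (pvLenJ d args)
      (by rw [List.take_length])
    rw [List.take_length] at this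
    exact this
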